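-- pv_equiv track=rewrite | github.com/MarioLara21/TodasFunciones | TareaRec1.py | multImpar
-- ===== SOURCE A (Python) =====
-- def esPar(num):
--     """
--     Funcionalidad: Verifica si el dígito es par
--     Entradas: num= Número entero
--     Salidas: Si el número es par o no
--     Restricciones: El dato debe ser un número
--     """
--     if num%2==0:
--         return True
--     return False
--
-- def multImpar(num):
--     """
--     Funcionalidad: Multiplica los números impares de una cifra
--     Entradas: num= Número entero
--     Salidas: Dígitos impares multiplicados
--     Restricciones: El número debe ser entero
--     """
--     if (num//10)==0:
--         if esPar(num)==False:
--             return num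
--         else:
--             return 1*num
--     else:
--         if esPar(num%10)==False:
--             return (num%10) * multImpar(num//10)
--         else:
--             return multImpar(num//10)
-- ===== SOURCE B (Python) =====
-- def multImpar(num):
--     result = 1
--     while num // 10 != 0:
--         d = num % 10
--         if d % 2:
--             result *= d
--         num //= 10
--     return result * num
-- ===== Notes on version B (the rewrite author's own statement) =====
-- stated objective: alternative
-- what changed: Replaces the recursive digit descent with an iterative while-loop carrying a running product accumulator, multiplying in the leading digit unconditionally at the end.
import Mathlib
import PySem

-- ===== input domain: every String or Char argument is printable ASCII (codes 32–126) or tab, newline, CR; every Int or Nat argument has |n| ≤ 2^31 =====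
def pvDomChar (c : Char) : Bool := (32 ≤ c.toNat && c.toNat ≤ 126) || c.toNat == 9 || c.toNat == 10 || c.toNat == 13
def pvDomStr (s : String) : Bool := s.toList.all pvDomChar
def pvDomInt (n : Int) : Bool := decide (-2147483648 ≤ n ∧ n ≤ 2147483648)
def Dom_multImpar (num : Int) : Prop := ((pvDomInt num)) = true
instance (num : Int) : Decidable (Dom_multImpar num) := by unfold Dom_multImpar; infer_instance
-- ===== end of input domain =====

-- B replaces A's recursive digit descent by an iterative accumulator loop (same cost, different decomposition).
-- Pre_ excludes negative inputs, on which Python A exceeds the recursion limit (and B loops forever).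


-- ===== PORT A =====
def esPar (num : Int) : Bool :=
  if PySem.Int.mod num 2 = 0 then true else false

-- fuel makes the recursion total; num.natAbs + 1 steps suffice for every num ≥ 0 (the 0-fuel value is never reached inside Pre_)
def multImparGo (fuel : Nat) (num : Int) : Int :=
  match fuel with
  | 0 => 0
  | f + 1 =>
    if PySem.Int.floordiv num 10 = 0 then
      if esPar num = false then num else 1 * num
    else
      if esPar (PySem.Int.mod num 10) = false then
        (PySem.Int.mod num 10) * multImparGo f (PySem.Int.floordiv num 10)
      else
        multImparGo f (PySem.Int.floordiv num 10)

def multImpar (num : Int) : Int := multImparGo (num.natAbs + 1) num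

-- ===== PORT B =====
-- fuel makes the while-loop total; num.natAbs + 1 iterations suffice for every num ≥ 0
def multImparAltGo (fuel : Nat) (result num : Int) : Int :=
  match fuel with
  | 0 => result * num
  | f + 1 =>
    if PySem.Int.floordiv num 10 ≠ 0 then
      let d := PySem.Int.mod num 10
      multImparAltGo f (if PySem.Int.mod d 2 ≠ 0 then result * d else result) (PySem.Int.floordiv num 10)
    else
      result * num

def multImpar_alt (num : Int) : Int := multImparAltGo (num.natAbs + 1) 1 num

-- ===== PRECONDITION & SPEC =====
-- Pre_ excludes negative numbers: there Python A recurses forever (RecursionError) and B never leaves its loop.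
def Pre_multImpar (num : Int) : Prop := 0 ≤ num
instance (num : Int) : Decidable (Pre_multImpar num) := by unfold Pre_multImpar; infer_instance
def pvWitness_multImpar : Int := 1359

def Spec_multImpar (num : Int) (out : Int) : Prop := out = multImpar_alt num
instance (num : Int) (out : Int) : Decidable (Spec_multImpar num out) := by unfold Spec_multImpar; infer_instance

-- ===== CLAIM (what is proved, stated in full; the proofs are below) =====
def Claim_equal_multImpar : Prop := ∀ (num : Int), Dom_multImpar num → Pre_multImpar num → Spec_multImpar num (multImpar num)

-- ===== LEMMAS AND PROOFS =====

-- the accumulator loop computes result * (A's recursion), given enough fuel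
theorem altGo_eq_go (fuel : Nat) : ∀ (num result : Int), 0 ≤ num → num < fuel →
    multImparAltGo fuel result num = result * multImparGo fuel num := by
  induction fuel with
  | zero => intro num result h1 h2; omega
  | succ f ih =>
    intro num result h1 h2
    have hd : PySem.Int.floordiv num 10 = num / 10 :=
      PySem.Int.floordiv_eq_ediv_of_pos (by omega)
    have hm : PySem.Int.mod num 10 = num % 10 :=
      PySem.Int.mod_eq_emod_of_pos (by omega)
    simp only [multImparAltGo, multImparGo, hd, hm]
    by_cases hz : num / 10 = 0
    · simp only [hz, if_pos rfl, ne_eq, not_true_eq_false, if_false, if_true]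
      by_cases hp : esPar num = false <;> simp [hp] <;> ring
    · have h10 : 10 ≤ num := by omega
      have hlt : num / 10 < f := by omega
      have hge : 0 ≤ num / 10 := by omega
      simp only [if_neg hz, ne_eq, hz, not_false_eq_true, if_true]
      have hm2 : PySem.Int.mod (num % 10) 2 = num % 10 % 2 :=
        PySem.Int.mod_eq_emod_of_pos (by omega)
      rw [ih _ _ hge hlt]
      have hmm : num % 10 % 2 = num % 2 :=
        Int.emod_emod_of_dvd num (by norm_num)
      by_cases ho : num % 10 % 2 = 0
      · have ho2 : num % 2 = 0 := by rw [hmm] at ho; omega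
        have hp : esPar (num % 10) = true := by simp [esPar, hm2, hmm, ho2]
        have ho' : ¬ num % 2 = 1 := by omega
        simp [hp, ho, ho']
      · have ho2 : ¬ num % 2 = 0 := by rw [hmm] at ho; omega
        have hp : esPar (num % 10) = false := by simp [esPar, hm2, hmm, ho2]
        have ho' : num % 2 = 1 := by omega
        simp [hp, ho, ho']; ring

-- ===== VERDICT (by name: the statement is the Claim_ definition above) =====
theorem multImpar_spec : Claim_equal_multImpar := by
  intro num _ hpre
  unfold Spec_multImpar multImpar multImpar_alt
  rw [altGo_eq_go _ _ _ hpre (by omega), one_mul]
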